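-- pv_equiv track=rewrite | github.com/YoussefM890/problem_solving | codeforces/div 2/C. Sum on Subarrays.py | calc
-- ===== SOURCE A (Python) =====
-- def calc(n,k):
--     if k == 0 :
--         return [-1]*n
--     if k < n :
--         return [-1]*(k-1) + [200] + [-400] + [-1]*(n-k-1)
--     elif k == n :
--         return [-1]*(k-1) + [200]
--     else :
--         return calc(n-1,k-n)  +[1000]
-- ===== SOURCE B (Python) =====
-- def calc(n, k):
--     # Iterative: compute the recursion depth d and the base segment (m, r)
--     # in one arithmetic loop, then build the answer in a single concatenation.
--     m, r, d = n, k, 0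
--     while r > m and m > 0:
--         r -= m
--         m -= 1
--         d += 1
--     if r == 0:
--         base = [-1] * m
--     elif r == m:
--         base = [-1] * (r - 1) + [200]
--     else:
--         base = [-1] * (r - 1) + [200, -400] + [-1] * (m - r - 1)
--     return base + [1000] * d
-- ===== Notes on version B (the rewrite author's own statement) =====
-- stated objective: alternative
-- what changed: Replaces A's recursion, which concatenates a growing list at every level, with one arithmetic loop that computes the recursion depth d and the final base segment (m, r), then builds the whole answer in a single concatenation.
import Mathlib
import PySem

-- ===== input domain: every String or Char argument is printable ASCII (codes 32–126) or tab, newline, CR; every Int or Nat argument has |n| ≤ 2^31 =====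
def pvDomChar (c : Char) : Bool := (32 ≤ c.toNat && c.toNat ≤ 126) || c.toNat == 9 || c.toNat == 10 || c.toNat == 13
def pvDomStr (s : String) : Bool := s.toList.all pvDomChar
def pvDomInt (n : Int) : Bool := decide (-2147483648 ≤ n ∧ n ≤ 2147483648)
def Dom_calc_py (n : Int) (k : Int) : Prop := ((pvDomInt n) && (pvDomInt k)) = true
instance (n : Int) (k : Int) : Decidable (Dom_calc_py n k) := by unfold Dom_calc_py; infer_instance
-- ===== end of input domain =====

-- B replaces A's recursion (which concatenates a list at every level) by one arithmetic
-- loop computing the depth and base segment, then a single-pass build (objective: alternative).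

-- ===== PORT A =====
-- Literal transliteration of A's recursion; fuel only makes it total (on Pre_ inputs the
-- recursion depth is < n.toNat + 1, so the fuel never runs out there).
def calcA : Nat → Int → Int → List Int
  | 0, _, _ => []
  | fuel+1, n, k =>
    if k = 0 then List.replicate n.toNat (-1)
    else if k < n then
      List.replicate (k-1).toNat (-1) ++ [200] ++ [-400] ++ List.replicate (n-k-1).toNat (-1)
    else if k = n then List.replicate (k-1).toNat (-1) ++ [200]
    else calcA fuel (n-1) (k-n) ++ [1000]

def calc_py (n : Int) (k : Int) : List Int := calcA (n.toNat + 1) n k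

-- ===== PORT B =====
-- B's while loop (m,r,d state); fuel only makes it total — the loop guard requires m > 0
-- and m decreases each step, so with fuel n.toNat + 1 the fuel never runs out on any input.
def findB : Nat → Int → Int → Int → Int × Int × Int
  | 0, m, r, d => (m, r, d)
  | fuel+1, m, r, d => if r > m ∧ m > 0 then findB fuel (m-1) (r-m) (d+1) else (m, r, d)

def mkBase (m r : Int) : List Int :=
  if r = 0 then List.replicate m.toNat (-1)
  else if r = m then List.replicate (r-1).toNat (-1) ++ [200]
  else List.replicate (r-1).toNat (-1) ++ [200, -400] ++ List.replicate (m-r-1).toNat (-1)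

def calc_py_alt (n : Int) (k : Int) : List Int :=
  let t := findB (n.toNat + 1) n k 0
  mkBase t.1 t.2.1 ++ List.replicate t.2.2.toNat 1000

-- ===== PRECONDITION & SPEC =====
-- Pre_ is exactly where the Python A returns: outside it A's recursion never reaches a
-- base case and raises RecursionError.
def Pre_calc_py (n : Int) (k : Int) : Prop :=
  (0 ≤ n ∧ 2*k ≤ n*(n+1)) ∨ (n < 0 ∧ (k ≤ n ∨ k = 0))
instance (n : Int) (k : Int) : Decidable (Pre_calc_py n k) := by unfold Pre_calc_py; infer_instance
def pvWitness_calc_py : Int × Int := (4, 7)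

def Spec_calc_py (n : Int) (k : Int) (out : List Int) : Prop := out = calc_py_alt n k
instance (n : Int) (k : Int) (out : List Int) : Decidable (Spec_calc_py n k out) := by unfold Spec_calc_py; infer_instance

-- ===== CLAIM (what is proved, stated in full; the proofs are below) =====
def Claim_equal_calc_py : Prop := ∀ (n : Int) (k : Int), Dom_calc_py n k → Pre_calc_py n k → Spec_calc_py n k (calc_py n k)

-- ===== LEMMAS AND PROOFS =====

-- Main invariant: with common fuel exceeding n, A's recursion with a pending tail of
-- d thousands equals B's base-from-loop-state plus replicated thousands.
lemma calc_main : ∀ (fuel : Nat) (n k d : Int), Pre_calc_py n k → 0 ≤ d → n.toNat < fuel →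
    calcA fuel n k ++ List.replicate d.toNat 1000 =
      mkBase (findB fuel n k d).1 (findB fuel n k d).2.1 ++
        List.replicate (findB fuel n k d).2.2.toNat 1000 := by
  intro fuel
  induction fuel with
  | zero => intro n k d _ _ h; omega
  | succ fuel ih =>
    intro n k d hpre hd hf
    by_cases hk0 : k = 0
    · subst hk0
      have hguard : ¬ ((0:Int) > n ∧ n > 0) := by omega
      simp [calcA, findB, hguard, mkBase]
    · by_cases hlt : k < n
      · have hguard : ¬ (k > n ∧ n > 0) := by omega
        simp [calcA, findB, if_neg hk0, if_pos hlt, if_neg hguard, mkBase, show ¬ k = n by omega]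
      · by_cases heq : k = n
        · have hguard : ¬ (k > n ∧ n > 0) := by omega
          simp [calcA, findB, if_neg hk0, if_neg hlt, if_pos heq, if_neg hguard, mkBase]
        · -- recursive case: k > n, and Pre_ forces 1 ≤ n
          have hkn : k > n := by omega
          have hn1 : 1 ≤ n := by
            rcases hpre with ⟨hn, hb⟩ | ⟨hn, hb⟩
            · rcases lt_or_ge 0 n with h | h
              · omega
              · exfalso; nlinarith
            · omega
          have hpre' : Pre_calc_py (n-1) (k-n) := by
            left
            constructor
            · omega
            · rcases hpre with ⟨_, hb⟩ | ⟨hn, _⟩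
              · nlinarith
              · omega
          have hguard : (k > n ∧ n > 0) := ⟨hkn, by omega⟩
          have hf' : (n-1).toNat < fuel := by omega
          have hrep : List.replicate d.toNat (1000:Int) = List.replicate ((d+1).toNat - 1) 1000 := by
            congr 1; omega
          have hstep := ih (n-1) (k-n) (d+1) hpre' (by omega) hf'
          simp only [calcA, findB, if_neg hk0, if_neg hlt, if_neg heq, if_pos hguard]
          rw [List.append_assoc]
          have : ([1000] : List Int) ++ List.replicate d.toNat 1000 = List.replicate (d+1).toNat 1000 := by
            have : (d+1).toNat = d.toNat + 1 := by omega
            rw [this]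
            simp [List.replicate_succ]
          rw [this, hstep]

-- ===== VERDICT (by name: the statement is the Claim_ definition above) =====
theorem calc_py_spec : Claim_equal_calc_py := by
  intro n k _ hpre
  unfold Spec_calc_py calc_py calc_py_alt
  have h := calc_main (n.toNat + 1) n k 0 hpre (le_refl 0) (by omega)
  simpa using h
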